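-- pv_equiv track=rewrite | github.com/Jaimeum/music-generator | code/Mr.Piano.py | get_scale_pitches
-- ===== SOURCE A (Python) =====
-- def get_scale_pitches(root: int, scale_type: str = 'major') -> set:
--     """
--     Genera un conjunto de notas basado en la raíz y el tipo de escala.
--
--     Parámetros:
--         root (int): Nota raíz en número MIDI.
--         scale_type (str): Tipo de escala ('major' o 'minor').
--
--     Retorna:
--         set: Conjunto de notas MIDI en la escala.
--     """
--     if scale_type == 'major':
--         intervals = [0, 2, 4, 5, 7, 9, 11]  # Intervalos de la escala mayor
--     elif scale_type == 'minor':
--         intervals = [0, 2, 3, 5, 7, 8, 10]  # Intervalos de la escala menor natural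
--     else:
--         raise ValueError("Tipo de escala no soportado. Usa 'major' o 'minor'.")
--
--     scale_pitches = set(root + interval for interval in intervals)
--     return scale_pitches
-- ===== SOURCE B (Python) =====
-- def get_scale_pitches(root: int, scale_type: str = 'major') -> set:
--     if scale_type == 'major':
--         steps = [2, 2, 1, 2, 2, 2]
--     elif scale_type == 'minor':
--         steps = [2, 1, 2, 2, 1, 2]
--     else:
--         raise ValueError("Tipo de escala no soportado. Usa 'major' o 'minor'.")
--     pitches = {root}
--     current = root
--     for step in steps:
--         current += step
--         pitches.add(current)
--     return pitches
-- ===== Notes on version B (the rewrite author's own statement) =====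
-- stated objective: alternative
-- what changed: B walks the scale incrementally with a running pitch and a step-size list instead of mapping fixed absolute interval offsets into a set comprehension.
import Mathlib
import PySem

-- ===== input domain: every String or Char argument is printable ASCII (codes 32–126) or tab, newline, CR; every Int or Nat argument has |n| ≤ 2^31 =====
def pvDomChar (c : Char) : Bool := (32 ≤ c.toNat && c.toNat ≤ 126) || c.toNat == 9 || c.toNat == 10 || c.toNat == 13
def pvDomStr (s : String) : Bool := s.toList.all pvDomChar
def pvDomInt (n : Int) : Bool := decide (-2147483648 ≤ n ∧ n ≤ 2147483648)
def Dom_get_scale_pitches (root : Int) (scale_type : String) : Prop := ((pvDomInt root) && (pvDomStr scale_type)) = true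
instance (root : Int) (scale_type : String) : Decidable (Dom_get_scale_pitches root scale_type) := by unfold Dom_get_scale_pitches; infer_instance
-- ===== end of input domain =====

-- B walks the scale incrementally (running pitch + step-size list) instead of mapping fixed absolute offsets into a set; Pre_ excludes the ValueError branch.
-- ===== PORT A =====
def get_scale_pitches (root : Int) (scale_type : String) : List Int :=
  if scale_type = "major" then
    PySem.Set.ofList ([0, 2, 4, 5, 7, 9, 11].map (fun i => root + i))
  else if scale_type = "minor" then
    PySem.Set.ofList ([0, 2, 3, 5, 7, 8, 10].map (fun i => root + i))
  else []  -- raise ValueError: excluded by Pre_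

-- ===== PORT B =====
def get_scale_pitches_alt (root : Int) (scale_type : String) : List Int :=
  if scale_type = "major" ∨ scale_type = "minor" then
    let steps : List Int := if scale_type = "major" then [2, 2, 1, 2, 2, 2] else [2, 1, 2, 2, 1, 2]
    (steps.foldl (fun (st : PySem.Set Int × Int) step =>
        let current := st.2 + step
        (PySem.Set.add st.1 current, current))
      (PySem.Set.add PySem.Set.empty root, root)).1
  else []  -- raise ValueError: excluded by Pre_

-- ===== PRECONDITION & SPEC =====
-- Pre_ excludes exactly the inputs on which A raises ValueError (unsupported scale_type).
def Pre_get_scale_pitches (root : Int) (scale_type : String) : Prop :=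
  scale_type = "major" ∨ scale_type = "minor"
instance (root : Int) (scale_type : String) : Decidable (Pre_get_scale_pitches root scale_type) := by
  unfold Pre_get_scale_pitches; infer_instance
def pvWitness_get_scale_pitches : Int × String := (60, "major")

def Spec_get_scale_pitches (root : Int) (scale_type : String) (out : List Int) : Prop := out = get_scale_pitches_alt root scale_type
instance (root : Int) (scale_type : String) (out : List Int) : Decidable (Spec_get_scale_pitches root scale_type out) := by unfold Spec_get_scale_pitches; infer_instance

-- ===== CLAIM (what is proved, stated in full; the proofs are below) =====
def Claim_equal_get_scale_pitches : Prop := ∀ (root : Int) (scale_type : String), Dom_get_scale_pitches root scale_type → Pre_get_scale_pitches root scale_type → Spec_get_scale_pitches root scale_type (get_scale_pitches root scale_type)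

-- ===== LEMMAS AND PROOFS =====
theorem addNotMem {x : Int} {s : List Int} (h : ¬ x ∈ s) : PySem.Set.add s x = s ++ [x] := by
  simp [PySem.Set.add, h]

theorem gsp_major (root : Int) :
    get_scale_pitches root "major" = get_scale_pitches_alt root "major" := by
  unfold get_scale_pitches get_scale_pitches_alt
  simp only [String.reduceEq, reduceIte, or_true, true_or, or_false, false_or, if_true, if_false]
  rw [show ([0, 2, 4, 5, 7, 9, 11].map (fun i => root + i))
      = [root+0, root+2, root+4, root+5, root+7, root+9, root+11] from by simp]
  rw [PySem.Set.ofList_eq_self_of_nodup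
      (xs := [root+0, root+2, root+4, root+5, root+7, root+9, root+11])
      (by simp [List.nodup_cons]; try omega)]
  simp only [List.foldl, show PySem.Set.add PySem.Set.empty root = [root] from rfl]
  rw [addNotMem (by simp; try omega), addNotMem (by simp; try omega), addNotMem (by simp; try omega),
      addNotMem (by simp; try omega), addNotMem (by simp; try omega), addNotMem (by simp; try omega)]
  norm_num
  omega

theorem gsp_minor (root : Int) :
    get_scale_pitches root "minor" = get_scale_pitches_alt root "minor" := by
  unfold get_scale_pitches get_scale_pitches_alt
  simp only [String.reduceEq, reduceIte, or_true, true_or, or_false, false_or, if_true, if_false]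
  rw [show ([0, 2, 3, 5, 7, 8, 10].map (fun i => root + i))
      = [root+0, root+2, root+3, root+5, root+7, root+8, root+10] from by simp]
  rw [PySem.Set.ofList_eq_self_of_nodup
      (xs := [root+0, root+2, root+3, root+5, root+7, root+8, root+10])
      (by simp [List.nodup_cons]; try omega)]
  simp only [List.foldl, show PySem.Set.add PySem.Set.empty root = [root] from rfl]
  rw [addNotMem (by simp; try omega), addNotMem (by simp; try omega), addNotMem (by simp; try omega),
      addNotMem (by simp; try omega), addNotMem (by simp; try omega), addNotMem (by simp; try omega)]
  norm_num
  omega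

-- ===== VERDICT (by name: the statement is the Claim_ definition above) =====
theorem get_scale_pitches_spec : Claim_equal_get_scale_pitches := by
  intro root scale_type _ hpre
  unfold Spec_get_scale_pitches
  rcases hpre with h | h <;> subst h
  · exact gsp_major root
  · exact gsp_minor root
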